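-- pv_equiv track=rewrite | github.com/mintsht/PL-SHTANKOV | ПР4.10.py | f
-- ===== SOURCE A (Python) =====
-- def f(N, k):
--     if N <= 0 or k <= 0:
--         return 0
--     a, b = 0, 1
--     s = 0
--     for i in range(1, k + N):
--         if i >= k:
--             s += a
--         a, b = b, a + b
--     return s
-- ===== SOURCE B (Python) =====
-- def _fd(n):
--     # fast doubling: returns (F(n), F(n+1))
--     if n == 0:
--         return (0, 1)
--     a, b = _fd(n // 2)
--     c = a * (2 * b - a)
--     d = a * a + b * b
--     if n % 2 == 0:
--         return (c, d)
--     else: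
--         return (d, c + d)
--
-- def f(N, k):
--     if N <= 0 or k <= 0:
--         return 0
--     # sum_{i=k}^{k+N-1} F(i-1) = F(k+N) - F(k)
--     return _fd(k + N)[0] - _fd(k)[0]
-- ===== Notes on version B (the rewrite author's own statement) =====
-- stated objective: faster
-- what changed: replaces the O(N+k) iterative loop with two fast-doubling Fibonacci computations and the closed-form identity sum_{i=k}^{k+N-1} F(i-1) = F(k+N) - F(k); intended as faster, measured 153x at the largest size both finished (n=16384), though both time out when k+N is so large the result itself is astronomically long
import Mathlib
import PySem

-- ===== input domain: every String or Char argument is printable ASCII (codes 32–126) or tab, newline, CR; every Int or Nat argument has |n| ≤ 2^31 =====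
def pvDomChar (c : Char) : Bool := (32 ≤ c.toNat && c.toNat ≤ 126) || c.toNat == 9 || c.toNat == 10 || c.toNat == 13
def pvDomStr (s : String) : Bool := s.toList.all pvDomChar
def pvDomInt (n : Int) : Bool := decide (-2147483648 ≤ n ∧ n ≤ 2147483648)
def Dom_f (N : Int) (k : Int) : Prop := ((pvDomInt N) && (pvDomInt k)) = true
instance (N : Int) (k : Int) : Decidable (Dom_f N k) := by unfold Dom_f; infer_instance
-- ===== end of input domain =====

-- B replaces A's linear loop by two fast-doubling Fibonacci computations and the
-- closed-form identity sum_{i=k}^{k+N-1} F(i-1) = F(k+N) - F(k); intended as faster,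
-- measured 153x at the largest size both Pythons finished.

-- ===== PORT A =====
def f (N : Int) (k : Int) : Int :=
  if N ≤ 0 ∨ k ≤ 0 then 0
  else
    let st := (PySem.List.pyRange 1 (k + N) 1).foldl
      (fun (st : Int × Int × Int) i =>
        let a := st.1; let b := st.2.1; let s := st.2.2
        let s := if i ≥ k then s + a else s
        (b, a + b, s)) (0, 1, 0)
    st.2.2

-- ===== PORT B =====
-- fast doubling: fd n = (F(n), F(n+1))
def fd : Nat → Int × Int
  | 0 => (0, 1)
  | Nat.succ n =>
    let p := fd ((n + 1) / 2)
    let a := p.1; let b := p.2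
    let c := a * (2 * b - a)
    let d := a * a + b * b
    if (n + 1) % 2 = 0 then (c, d) else (d, c + d)
decreasing_by exact Nat.div_lt_self (Nat.succ_pos n) one_lt_two

def f_alt (N : Int) (k : Int) : Int :=
  if N ≤ 0 ∨ k ≤ 0 then 0
  else (fd (k + N).toNat).1 - (fd k.toNat).1

-- ===== PRECONDITION & SPEC =====
def Spec_f (N : Int) (k : Int) (out : Int) : Prop := out = f_alt N k
instance (N : Int) (k : Int) (out : Int) : Decidable (Spec_f N k out) := by unfold Spec_f; infer_instance

-- ===== CLAIM (what is proved, stated in full; the proofs are below) =====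
def Claim_equal_f : Prop := ∀ (N : Int) (k : Int), Dom_f N k → Spec_f N k (f N k)

-- ===== LEMMAS AND PROOFS =====

theorem fd_eq (n : Nat) : fd n = ((Nat.fib n : Int), (Nat.fib (n + 1) : Int)) := by
  induction n using Nat.strong_induction_on with
  | _ n ih =>
    match n with
    | 0 => simp [fd]
    | Nat.succ m =>
      rw [fd]
      rw [ih ((m + 1) / 2) (Nat.div_lt_self (Nat.succ_pos m) one_lt_two)]
      rcases Nat.even_or_odd (m + 1) with ⟨t, ht⟩ | ⟨t, ht⟩
      · have h2 : (m + 1) % 2 = 0 := by omega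
        have hd : (m + 1) / 2 = t := by omega
        simp only [h2, hd, if_true]
        have hfib1 : Nat.fib (m + 1) = Nat.fib t * (2 * Nat.fib (t + 1) - Nat.fib t) := by
          have h2t : m + 1 = 2 * t := by omega
          rw [h2t, Nat.fib_two_mul]
        have hfib2 : Nat.fib (m + 1 + 1) = Nat.fib (t + 1) ^ 2 + Nat.fib t ^ 2 := by
          rw [ht]; have := Nat.fib_two_mul_add_one t; rw [two_mul] at this; omega
        have hle : Nat.fib t ≤ 2 * Nat.fib (t + 1) := by
          have := Nat.fib_le_fib_succ (n := t); omega
        norm_num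
        constructor
        · push_cast [hfib1, Int.ofNat_sub hle]
          ring
        · push_cast [hfib2]; ring
      · have h2 : (m + 1) % 2 = 1 := by omega
        have hd : (m + 1) / 2 = t := by omega
        simp only [h2, hd]
        norm_num
        have hfib1 : Nat.fib (m + 1) = Nat.fib (t + 1) ^ 2 + Nat.fib t ^ 2 := by
          rw [ht]; have := Nat.fib_two_mul_add_one t; omega
        have hfib2 : (Nat.fib (m + 1 + 1) : Int)
            = Nat.fib t * (2 * Nat.fib (t + 1) - Nat.fib t) + (Nat.fib (t + 1) ^ 2 + Nat.fib t ^ 2) := by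
          have h22 : m + 1 + 1 = 2 * (t + 1) := by omega
          rw [h22, Nat.fib_two_mul]
          have hle : Nat.fib (t + 1) ≤ 2 * Nat.fib (t + 1 + 1) := by
            have := Nat.fib_le_fib_succ (n := t + 1); omega
          push_cast [Int.ofNat_sub hle]
          have hsucc : (Nat.fib (t + 1 + 1) : Int) = Nat.fib t + Nat.fib (t + 1) := by
            rw [Nat.fib_add_two]; push_cast; ring
          rw [hsucc]; ring
        constructor
        · push_cast [hfib1]; ring
        · rw [hfib2]; ring

def stepA (k : Int) (st : Int × Int × Int) (i : Int) : Int × Int × Int :=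
  let a := st.1; let b := st.2.1; let s := st.2.2
  let s := if i ≥ k then s + a else s
  (b, a + b, s)

theorem loop_inv (k : Int) (hk : 1 ≤ k) (m : Nat) :
    (PySem.List.pyRange 1 (1 + (m : Int)) 1).foldl (stepA k) (0, 1, 0)
      = ((Nat.fib m : Int), (Nat.fib (m + 1) : Int),
         if k ≤ (m : Int) then (Nat.fib (m + 1) : Int) - (Nat.fib k.toNat : Int) else 0) := by
  induction m with
  | zero =>
    rw [PySem.List.pyRange_one_eq_nil (by norm_num)]
    simp [Nat.fib]
    intro h; omega
  | succ m ih =>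
    have hsplit : (1 : Int) + (m + 1 : Nat) = (1 + (m : Int)) + 1 := by push_cast; ring
    rw [hsplit, PySem.List.pyRange_one_succ_right (by omega), List.foldl_append, ih]
    simp only [List.foldl_cons, List.foldl_nil, stepA]
    have hfib : (Nat.fib (m + 1 + 1) : Int) = Nat.fib m + Nat.fib (m + 1) := by
      rw [show m + 1 + 1 = m + 2 from rfl, Nat.fib_add_two]; push_cast; ring
    by_cases hcase : k ≤ (m : Int) + 1
    · have hge : (1 : Int) + m ≥ k := by omega
      by_cases hprev : k ≤ (m : Int)
      · simp only [if_pos hprev, if_pos hge]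
        rw [if_pos (by push_cast; omega)]
        refine Prod.ext rfl (Prod.ext hfib.symm ?_)
        push_cast
        omega
      · have hkm : k = (m : Int) + 1 := by omega
        have hkn : k.toNat = m + 1 := by omega
        simp only [if_neg hprev, if_pos hge]
        rw [if_pos (by push_cast; omega)]
        refine Prod.ext rfl (Prod.ext hfib.symm ?_)
        rw [hkn]
        push_cast
        omega
    · have hge : ¬ ((1 : Int) + m ≥ k) := by omega
      have hprev : ¬ (k ≤ (m : Int)) := by omega
      simp only [if_neg hprev, if_neg hge]
      rw [if_neg (by push_cast; omega)]
      exact Prod.ext rfl (Prod.ext hfib.symm rfl)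

-- ===== VERDICT (by name: the statement is the Claim_ definition above) =====
theorem f_spec : Claim_equal_f := by
  intro N k _
  unfold Spec_f f f_alt
  by_cases h : N ≤ 0 ∨ k ≤ 0
  · simp [h]
  · simp only [if_neg h]
    rw [not_or, not_le, not_le] at h
    obtain ⟨hN, hk⟩ := h
    have hrange : k + N = 1 + (((k + N - 1).toNat : Nat) : Int) := by omega
    rw [hrange]
    have hfold := loop_inv k (by omega) (k + N - 1).toNat
    have hstep : (fun (st : Int × Int × Int) i =>
        let a := st.1; let b := st.2.1; let s := st.2.2
        let s := if i ≥ k then s + a else s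
        (b, a + b, s)) = stepA k := rfl
    rw [hstep, hfold]
    have hle : k ≤ ((((k + N - 1).toNat) : Nat) : Int) := by omega
    simp only [if_pos hle]
    have h1 : (k + N - 1).toNat + 1 = (1 + (((k + N - 1).toNat : Nat) : Int)).toNat := by omega
    rw [h1, fd_eq (1 + (((k + N - 1).toNat : Nat) : Int)).toNat, fd_eq k.toNat]
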